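-- pv_equiv track=rewrite | github.com/Maycon-S-Vieira/estudos-python | Exercicios/Exerc14.py | verificar_senha
-- ===== SOURCE A (Python) =====
-- def verificar_senha(senha):
--     """Verifica se a senha atende aos critérios de segurança."""
--     erros = []
--
--     if len(senha) < 8:
--         erros.append("A senha deve ter pelo menos 8 caracteres.")
--
--     if not any(c.isupper() for c in senha):
--         erros.append("A senha deve conter pelo menos uma letra maiúscula.")
--
--     if not any(c.islower() for c in senha):
--         erros.append("A senha deve conter pelo menos uma letra minúscula.")
--
--     if not any(c.isdigit() for c in senha):
--         erros.append("A senha deve conter pelo menos um número.")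
--
--     if not any(c in "!@#$%^&*()-_=+[]{};:,.<>?/\\|" for c in senha):
--         erros.append("A senha deve conter pelo menos um caractere especial.")
--
--     return erros
-- ===== SOURCE B (Python) =====
-- def verificar_senha(senha):
--     """Verifica se a senha atende aos critérios de segurança."""
--     has_upper = has_lower = has_digit = has_special = False
--     for c in senha:
--         if c.isupper():
--             has_upper = True
--         if c.islower():
--             has_lower = True
--         if c.isdigit():
--             has_digit = True
--         if c in "!@#$%^&*()-_=+[]{};:,.<>?/\\|":
--             has_special = True
--     erros = []
--     if len(senha) < 8:
--         erros.append("A senha deve ter pelo menos 8 caracteres.")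
--     if not has_upper:
--         erros.append("A senha deve conter pelo menos uma letra maiúscula.")
--     if not has_lower:
--         erros.append("A senha deve conter pelo menos uma letra minúscula.")
--     if not has_digit:
--         erros.append("A senha deve conter pelo menos um número.")
--     if not has_special:
--         erros.append("A senha deve conter pelo menos um caractere especial.")
--     return erros
-- ===== Notes on version B (the rewrite author's own statement) =====
-- stated objective: simpler
-- what changed: Replaces A's four separate any(...) generator scans over the password with one single pass that sets boolean flags, then emits the error messages from the flags in the original order (one traversal, no generator objects).
import Mathlib
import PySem

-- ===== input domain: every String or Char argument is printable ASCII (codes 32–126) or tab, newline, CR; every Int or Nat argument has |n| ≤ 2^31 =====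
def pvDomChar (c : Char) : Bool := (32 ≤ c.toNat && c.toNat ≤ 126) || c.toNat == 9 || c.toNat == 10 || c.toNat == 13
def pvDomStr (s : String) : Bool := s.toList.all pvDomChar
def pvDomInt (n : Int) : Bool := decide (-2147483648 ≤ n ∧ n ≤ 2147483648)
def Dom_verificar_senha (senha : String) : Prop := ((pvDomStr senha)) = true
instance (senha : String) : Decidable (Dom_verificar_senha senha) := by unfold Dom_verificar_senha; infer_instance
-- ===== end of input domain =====

-- B replaces A's four separate any(...) scans by one single pass collecting boolean flags (objective: simpler decomposition).

-- ===== PORT A =====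
def pvEspeciais : List Char := "!@#$%^&*()-_=+[]{};:,.<>?/\\|".toList

def verificar_senha (senha : String) : List String :=
  let erros : List String := []
  let erros := if PySem.Str.len senha < 8 then erros ++ ["A senha deve ter pelo menos 8 caracteres."] else erros
  let erros := if !(senha.toList.any (fun c => PySem.Chars.isupper c)) then erros ++ ["A senha deve conter pelo menos uma letra maiúscula."] else erros
  let erros := if !(senha.toList.any (fun c => PySem.Chars.islower c)) then erros ++ ["A senha deve conter pelo menos uma letra minúscula."] else erros
  let erros := if !(senha.toList.any (fun c => PySem.Chars.isdigit c)) then erros ++ ["A senha deve conter pelo menos um número."] else erros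
  let erros := if !(senha.toList.any (fun c => pvEspeciais.contains c)) then erros ++ ["A senha deve conter pelo menos um caractere especial."] else erros
  erros

-- ===== PORT B =====
def verificar_senha_alt (senha : String) : List String :=
  let flags := senha.toList.foldl
    (fun (s : Bool × Bool × Bool × Bool) c =>
      ( if PySem.Chars.isupper c then true else s.1,
        if PySem.Chars.islower c then true else s.2.1,
        if PySem.Chars.isdigit c then true else s.2.2.1,
        if pvEspeciais.contains c then true else s.2.2.2))
    (false, false, false, false)
  let erros : List String := []
  let erros := if PySem.Str.len senha < 8 then erros ++ ["A senha deve ter pelo menos 8 caracteres."] else erros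
  let erros := if !flags.1 then erros ++ ["A senha deve conter pelo menos uma letra maiúscula."] else erros
  let erros := if !flags.2.1 then erros ++ ["A senha deve conter pelo menos uma letra minúscula."] else erros
  let erros := if !flags.2.2.1 then erros ++ ["A senha deve conter pelo menos um número."] else erros
  let erros := if !flags.2.2.2 then erros ++ ["A senha deve conter pelo menos um caractere especial."] else erros
  erros

-- ===== PRECONDITION & SPEC =====
def Spec_verificar_senha (senha : String) (out : List String) : Prop := out = verificar_senha_alt senha
instance (senha : String) (out : List String) : Decidable (Spec_verificar_senha senha out) := by unfold Spec_verificar_senha; infer_instance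

-- ===== CLAIM (what is proved, stated in full; the proofs are below) =====
def Claim_equal_verificar_senha : Prop := ∀ (senha : String), Dom_verificar_senha senha → Spec_verificar_senha senha (verificar_senha senha)

-- ===== LEMMAS AND PROOFS =====
theorem pvFlags_foldl (l : List Char) (a b c d : Bool) :
    l.foldl
      (fun (s : Bool × Bool × Bool × Bool) c =>
        ( if PySem.Chars.isupper c then true else s.1,
          if PySem.Chars.islower c then true else s.2.1,
          if PySem.Chars.isdigit c then true else s.2.2.1,
          if pvEspeciais.contains c then true else s.2.2.2))
      (a, b, c, d)
    = (a || l.any (fun c => PySem.Chars.isupper c),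
       b || l.any (fun c => PySem.Chars.islower c),
       c || l.any (fun c => PySem.Chars.isdigit c),
       d || l.any (fun c => pvEspeciais.contains c)) := by
  induction l generalizing a b c d with
  | nil => simp
  | cons x xs ih =>
    simp only [List.foldl_cons, List.any_cons, ih]
    by_cases h1 : PySem.Chars.isupper x <;> by_cases h2 : PySem.Chars.islower x <;>
      by_cases h3 : PySem.Chars.isdigit x <;> by_cases h4 : pvEspeciais.contains x <;>
      simp [h1, h2, h3, Bool.or_assoc, Bool.or_left_comm]

-- ===== VERDICT (by name: the statement is the Claim_ definition above) =====
theorem verificar_senha_spec : Claim_equal_verificar_senha := by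
  intro senha _
  unfold Spec_verificar_senha verificar_senha verificar_senha_alt
  rw [pvFlags_foldl]
  simp
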